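-- pv_equiv track=rewrite | github.com/msegan99/WebApp-301 | handleWebsocket.py | useData
-- ===== SOURCE A (Python) =====
-- def useData(SomeData):
--
--     User = ""
--     Comm = ""
--     theList = (SomeData.lstrip("{")).rstrip("}").split(",")
--     for d in theList:
--         keyVal = d.split(":",maxsplit=1)
--         if keyVal[0] == "\"username\"":
--             User = keyVal[1].strip("\"")
--         elif keyVal[0] == "\"comment\"":
--             Comm = keyVal[1].strip("\"")
--
--     # DO SOMETHING WITH THIS INFO HERE! THIS IS WHERE UPVOTE FUNCTIONALITY SHOULD BE
--
--     return ("{\"username\":\"" +User+ "\",\"comment\":\"" +Comm+ "\"}")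
-- ===== SOURCE B (Python) =====
-- def useData(SomeData):
--     # Per-field reverse search: Python's "last assignment wins" is the same as
--     # "first match scanning the segments from the end", so each field is found
--     # by its own backwards scan with an early return.
--     segs = SomeData.lstrip("{").rstrip("}").split(",")
--
--     def field(key):
--         for d in reversed(segs):
--             kv = d.split(":", maxsplit=1)
--             if len(kv) == 2 and kv[0] == key:
--                 return kv[1].strip('"')
--         return ""
--
--     return '{"username":"' + field('"username"') + '","comment":"' + field('"comment"') + '"}'
-- ===== Notes on version B (the rewrite author's own statement) =====
-- stated objective: alternative
-- what changed: B replaces A's single forward fold carrying both fields (last assignment wins) with two independent backwards searches, one per key, each returning at the first match in reverse order.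
-- outside the precondition, e.g. on useData('"username"'): A raises IndexError, B returns '{"username":"","comment":""}'; on useData('"comment"'): A raises IndexError, B returns '{"username":"","comment":""}'
-- crash fix: A raises IndexError when some comma-separated segment has no colon yet is exactly one of the two quoted key tokens (keyVal[1] is missing); B returns the rebuilt string with that field empty. — e.g. on useData("{\"username\"}"): A raises IndexError, B returns "{\"username\":\"\",\"comment\":\"\"}"
import Mathlib
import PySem

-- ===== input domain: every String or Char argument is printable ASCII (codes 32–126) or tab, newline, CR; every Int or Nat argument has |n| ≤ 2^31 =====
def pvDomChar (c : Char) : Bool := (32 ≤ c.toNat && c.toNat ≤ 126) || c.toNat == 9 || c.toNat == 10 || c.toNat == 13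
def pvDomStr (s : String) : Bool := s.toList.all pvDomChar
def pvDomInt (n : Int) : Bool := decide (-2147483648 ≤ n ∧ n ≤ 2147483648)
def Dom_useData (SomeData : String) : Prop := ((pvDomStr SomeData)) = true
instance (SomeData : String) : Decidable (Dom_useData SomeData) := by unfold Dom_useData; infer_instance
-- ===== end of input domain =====

-- B replaces A's forward fold carrying both fields with two independent per-key
-- backwards searches (first match in reverse = last assignment wins); alternative, same cost.


-- hand ports of str.lstrip(chars) / str.rstrip(chars) (PySem has only the both-sided stripChars);
-- exact for the ASCII chars used here
def pvLstripChars (cs chars : List Char) : List Char := cs.dropWhile (chars.contains ·)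
def pvRstripChars (cs chars : List Char) : List Char :=
  (cs.reverse.dropWhile (chars.contains ·)).reverse

-- the comma-split list both Pythons start from (shared primitive pipeline, not algorithm)
def pvSegs (SomeData : String) : List (List Char) :=
  PySem.Chars.splitOn (pvRstripChars (pvLstripChars SomeData.toList ['{']) ['}']) [',']

-- ===== PORT A =====
-- keyVal[1] raises IndexError in Python when the segment has no colon and the key matches;
-- those inputs are excluded by Pre_useData, so the default [] below is never reached there.
def useData (SomeData : String) : String :=
  let uc := (pvSegs SomeData).foldl
    (fun (uc : List Char × List Char) d =>
      let keyVal := PySem.Chars.splitOnMax d [':'] 1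
      if PySem.List.pyGetD keyVal 0 [] = "\"username\"".toList then
        (PySem.Chars.stripChars (PySem.List.pyGetD keyVal 1 []) ['"'], uc.2)
      else if PySem.List.pyGetD keyVal 0 [] = "\"comment\"".toList then
        (uc.1, PySem.Chars.stripChars (PySem.List.pyGetD keyVal 1 []) ['"'])
      else uc)
    (([] : List Char), ([] : List Char))  -- User = "", Comm = ""
  String.ofList ("{\"username\":\"".toList ++ uc.1 ++ "\",\"comment\":\"".toList ++ uc.2 ++ "\"}".toList)

-- ===== PORT B =====
-- B's helper field(key): scan the segments from the end, return the stripped value of the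
-- first segment whose first-colon split has two parts and whose key matches; "" if none.
def pvField (key : List Char) : List (List Char) → List Char
  | [] => []
  | d :: rest =>
    let kv := PySem.Chars.splitOnMax d [':'] 1
    if kv.length = 2 ∧ PySem.List.pyGetD kv 0 [] = key then
      PySem.Chars.stripChars (PySem.List.pyGetD kv 1 []) ['"']
    else pvField key rest

def useData_alt (SomeData : String) : String :=
  let revSegs := (pvSegs SomeData).reverse   -- reversed(segs)
  String.ofList ("{\"username\":\"".toList ++ pvField "\"username\"".toList revSegs
    ++ "\",\"comment\":\"".toList ++ pvField "\"comment\"".toList revSegs ++ "\"}".toList)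

-- ===== PRECONDITION & SPEC =====
-- Pre_ excludes exactly the inputs on which A raises IndexError: a comma-separated segment
-- with no colon that is exactly one of the two quoted key tokens (keyVal[1] is missing).
def Pre_useData (SomeData : String) : Prop :=
  ∀ seg ∈ pvSegs SomeData, ':' ∉ seg →
    seg ≠ "\"username\"".toList ∧ seg ≠ "\"comment\"".toList
instance (SomeData : String) : Decidable (Pre_useData SomeData) := by
  unfold Pre_useData; infer_instance
def pvWitness_useData : String := "{\"username\":\"bob\",\"comment\":\"hi\"}"

-- A raises IndexError when some comma-separated segment has no ':' but equals the exact token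
-- "username" or "comment"; B returns the rebuilt string with that field empty.
def Raises_useData (SomeData : String) : Prop :=
  ∃ seg ∈ pvSegs SomeData, ':' ∉ seg ∧
    (seg = "\"username\"".toList ∨ seg = "\"comment\"".toList)
instance (SomeData : String) : Decidable (Raises_useData SomeData) := by
  unfold Raises_useData; infer_instance
def pvRaiseWitness_useData : String := "{\"username\"}"
def pvRaiseWitnessOut_useData : String := "{\"username\":\"\",\"comment\":\"\"}"

def Spec_useData (SomeData : String) (out : String) : Prop := out = useData_alt SomeData
instance (SomeData : String) (out : String) : Decidable (Spec_useData SomeData out) := by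
  unfold Spec_useData; infer_instance

-- ===== CLAIM (what is proved, stated in full; the proofs are below) =====
def Claim_equal_useData : Prop := ∀ (SomeData : String), Dom_useData SomeData → Pre_useData SomeData → Spec_useData SomeData (useData SomeData)
def Claim_raises_useData : Prop := (∀ (SomeData : String), Dom_useData SomeData → Raises_useData SomeData → ¬ Pre_useData SomeData) ∧ (Dom_useData (pvRaiseWitness_useData) ∧ Raises_useData (pvRaiseWitness_useData) ∧ useData_alt (pvRaiseWitness_useData) = pvRaiseWitnessOut_useData)

-- ===== LEMMAS AND PROOFS =====

-- characterization of s.split(':', maxsplit=1) used by both ports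
theorem pvGo_m0 (fuel : Nat) (l cur : List Char) (acc : List (List Char)) :
    PySem.Chars.splitOnMax.go [':'] fuel 0 l cur acc = ((cur.reverse ++ l) :: acc).reverse := by
  cases fuel with
  | zero => rfl
  | succ n => cases l with
    | nil => simp [PySem.Chars.splitOnMax.go]
    | cons c rest => simp [PySem.Chars.splitOnMax.go]

theorem pvGo_spec (fuel : Nat) (l cur : List Char) (acc : List (List Char)) (hf : l.length < fuel) :
    PySem.Chars.splitOnMax.go [':'] fuel 1 l cur acc =
      if ':' ∈ l then
        acc.reverse ++ [cur.reverse ++ l.takeWhile (· ≠ ':'), (l.dropWhile (· ≠ ':')).tail]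
      else acc.reverse ++ [cur.reverse ++ l] := by
  induction fuel generalizing l cur acc with
  | zero => omega
  | succ n ih =>
    cases l with
    | nil => simp [PySem.Chars.splitOnMax.go]
    | cons c rest =>
      by_cases hc : c = ':'
      · subst hc
        simp [PySem.Chars.splitOnMax.go, List.isPrefixOf, pvGo_m0]
      · have hpre : ([':'] : List Char).isPrefixOf (c :: rest) = false := by
          simp [List.isPrefixOf]; exact fun h => (hc h.symm).elim
        simp only [PySem.Chars.splitOnMax.go, hpre]
        simp only [List.length_cons] at hf
        rw [ih rest (c :: cur) acc (by omega)]
        by_cases hm : ':' ∈ rest <;>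
          simp [hm, hc, List.mem_cons, Ne.symm hc]

theorem pvSplitColon (d : List Char) :
    PySem.Chars.splitOnMax d [':'] 1 =
      if ':' ∈ d then [d.takeWhile (· ≠ ':'), (d.dropWhile (· ≠ ':')).tail]
      else [d] := by
  have h1 : ¬ ((1 : Int) < 0) := by decide
  simp only [PySem.Chars.splitOnMax, h1, if_false]
  rw [show (1 : Int).toNat = 1 from rfl, pvGo_spec (d.length + 1) d [] [] (Nat.lt_succ_self _)]
  by_cases hm : ':' ∈ d <;> simp [hm]

-- A's forward fold over the segments equals B's two backwards first-match searches:
-- "last assignment wins" = "first match on the reversed list".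
theorem pvLoop_rev (l : List (List Char))
    (hp : ∀ seg ∈ l, ':' ∉ seg → seg ≠ "\"username\"".toList ∧ seg ≠ "\"comment\"".toList) :
    l.foldl
      (fun (uc : List Char × List Char) d =>
        let keyVal := PySem.Chars.splitOnMax d [':'] 1
        if PySem.List.pyGetD keyVal 0 [] = "\"username\"".toList then
          (PySem.Chars.stripChars (PySem.List.pyGetD keyVal 1 []) ['"'], uc.2)
        else if PySem.List.pyGetD keyVal 0 [] = "\"comment\"".toList then
          (uc.1, PySem.Chars.stripChars (PySem.List.pyGetD keyVal 1 []) ['"'])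
        else uc)
      (([] : List Char), ([] : List Char)) =
    (pvField "\"username\"".toList l.reverse, pvField "\"comment\"".toList l.reverse) := by
  induction l using List.reverseRecOn with
  | nil => simp [pvField]
  | append_singleton xs d ih =>
    have hxs : ∀ seg ∈ xs, ':' ∉ seg →
        seg ≠ "\"username\"".toList ∧ seg ≠ "\"comment\"".toList :=
      fun s hs => hp s (List.mem_append_left _ hs)
    rw [List.foldl_append, ih hxs, List.reverse_append]
    simp only [List.reverse_singleton, List.singleton_append, List.foldl_cons, List.foldl_nil,
      pvField]
    rw [pvSplitColon d]
    by_cases hm : ':' ∈ d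
    · simp only [hm, if_true]
      generalize List.takeWhile (fun x => decide (x ≠ ':')) d = k
      generalize (List.dropWhile (fun x => decide (x ≠ ':')) d).tail = v
      have hg0 : PySem.List.pyGetD [k, v] 0 ([] : List Char) = k := by
        simp [PySem.List.pyGetD_ofNat']
      have hg1 : PySem.List.pyGetD [k, v] 1 ([] : List Char) = v := by
        simp [PySem.List.pyGetD_ofNat']
      have hlen : (([k, v] : List (List Char)).length = 2) := rfl
      have e1 : "\"username\"".toList = ['\"','u','s','e','r','n','a','m','e','\"'] := rfl
      have e2 : "\"comment\"".toList = ['\"','c','o','m','m','e','n','t','\"'] := rfl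
      simp only [hg0, hg1, hlen, true_and, e1, e2]
      by_cases hku : k = ['\"','u','s','e','r','n','a','m','e','\"']
      · have hkc : ¬ (k = ['\"','c','o','m','m','e','n','t','\"']) := by subst hku; decide
        simp [hku, hkc]
      · by_cases hkc : k = ['\"','c','o','m','m','e','n','t','\"'] <;> simp [hku, hkc]
    · simp only [hm, if_false]
      have hg0 : PySem.List.pyGetD [d] 0 ([] : List Char) = d := by
        simp [PySem.List.pyGetD_ofNat']
      have hlen : ¬ (([d] : List (List Char)).length = 2) := by simp
      obtain ⟨h1, h2⟩ := hp d (List.mem_append_right _ List.mem_cons_self) hm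
      have e1 : "\"username\"".toList = ['\"','u','s','e','r','n','a','m','e','\"'] := rfl
      have e2 : "\"comment\"".toList = ['\"','c','o','m','m','e','n','t','\"'] := rfl
      rw [e1] at h1; rw [e2] at h2
      simp [hg0, h1, h2]

-- ===== VERDICT (by name: the statement is the Claim_ definition above) =====
theorem useData_spec : Claim_equal_useData := by
  intro SomeData _ hpre
  unfold Spec_useData useData useData_alt
  rw [pvLoop_rev (pvSegs SomeData) hpre]

@[simp] theorem useData_raises : Claim_raises_useData := by
  unfold Claim_raises_useData
  refine ⟨fun s _ hr hpre => ?_, by decide, by decide, by decide⟩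
  obtain ⟨seg, hmem, hnc, hor⟩ := hr
  obtain ⟨h1, h2⟩ := hpre seg hmem hnc
  rcases hor with h | h
  · exact h1 h
  · exact h2 h
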